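-- pv_equiv track=rewrite | github.com/SeoinBack/CatGPT | catgpt/dataset/dataset_utils.py | simplify_formula
-- ===== SOURCE A (Python) =====
-- from math import gcd
-- from functools import partial, reduce
--
-- def simplify_formula(s):
--     tokens = s.split()
--     numbers = []
--     for i, token in enumerate(tokens):
--         if i % 2 == 0:
--             try:
--                 int(token)
--                 return s
--             except ValueError:
--                 continue
--         else:
--
--             try:
--                 n = int(token)
--                 numbers.append(n)
--             except ValueError:
--                 return s
--
--     if len(numbers) < 2:
--         return s
--
--     overall_gcd = reduce(gcd, numbers)
--     if overall_gcd == 1: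
--         return s
--
--     new_tokens = []
--     num_idx = 0
--     for i, token in enumerate(tokens):
--         if i % 2 == 0:
--             new_tokens.append(token)
--         else:
--             new_tokens.append(str(numbers[num_idx] // overall_gcd))
--             num_idx += 1
--     return " ".join(new_tokens)
-- ===== SOURCE B (Python) =====
-- from math import gcd
-- from functools import reduce
--
--
-- def _parse_pairs(tokens):
--     """Recursively consume tokens two at a time into (element, count) pairs,
--     plus an optional dangling trailing element; None if the shape is invalid
--     (an element position parses as int, or a count position does not)."""
--     if not tokens:
--         return [], None
--     head = tokens[0]
--     try:
--         int(head)
--         return None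
--     except ValueError:
--         pass
--     if len(tokens) == 1:
--         return [], head
--     try:
--         c = int(tokens[1])
--     except ValueError:
--         return None
--     rest = _parse_pairs(tokens[2:])
--     if rest is None:
--         return None
--     pairs, tail = rest
--     return [(head, c)] + pairs, tail
--
--
-- def simplify_formula(s):
--     parsed = _parse_pairs(s.split())
--     if parsed is None:
--         return s
--     pairs, tail = parsed
--     if len(pairs) < 2:
--         return s
--     g = reduce(gcd, (c for _, c in pairs))
--     if g == 1:
--         return s
--     words = [w for e, c in pairs for w in (e, str(c // g))]
--     if tail is not None:
--         words.append(tail)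
--     return " ".join(words)
-- ===== Notes on version B (the rewrite author's own statement) =====
-- stated objective: alternative
-- what changed: B parses the token stream once, recursively consuming two tokens at a time into an explicit list of (element, count) pairs plus an optional dangling trailing element, then gcd-reduces and rebuilds from that pair structure; A instead runs two flat index-parity loops over the raw token list with a running numbers list and a manual num_idx counter.
-- outside the precondition, e.g. on simplify_formula('H 0 O 0'): A raises ZeroDivisionError, B raises ZeroDivisionError
import Mathlib
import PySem

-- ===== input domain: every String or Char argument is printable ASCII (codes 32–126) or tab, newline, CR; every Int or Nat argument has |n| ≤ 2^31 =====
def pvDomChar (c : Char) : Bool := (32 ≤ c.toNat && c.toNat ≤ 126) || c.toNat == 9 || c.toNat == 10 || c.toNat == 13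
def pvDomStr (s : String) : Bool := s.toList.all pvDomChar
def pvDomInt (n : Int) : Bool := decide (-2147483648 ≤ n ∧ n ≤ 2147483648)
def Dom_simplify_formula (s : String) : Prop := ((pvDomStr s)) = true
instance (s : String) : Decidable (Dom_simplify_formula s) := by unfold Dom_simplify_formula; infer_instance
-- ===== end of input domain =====

-- B recursively parses the tokens two at a time into (element, count) pairs plus an optional
-- trailing element and rebuilds from that structure, instead of A's two index-parity loops;
-- objective: alternative decomposition. Return-value equivalence; neither mutates its input.

-- ===== PORT A =====
-- A's first loop: i = enumerate index; 'none' = the loop executed 'return s'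
def pvLoopA : Nat → List String → Option (List Int)
  | _, [] => some []
  | i, t :: rest =>
    if i % 2 = 0 then
      match PySem.Int.ofStr? t with
      | some _ => none
      | none => pvLoopA (i + 1) rest
    else
      match PySem.Int.ofStr? t with
      | some n => (pvLoopA (i + 1) rest).map (fun ns => n :: ns)
      | none => none

-- reduce(gcd, numbers) with numbers = n :: rest (math.gcd is |·|-gcd, = Int.gcd)
def pvReduceGcd (n : Int) (rest : List Int) : Int :=
  rest.foldl (fun a b => (Int.gcd a b : Int)) n

-- A's second loop; the empty-nums odd branch is unreachable (numbers has one entry per odd token)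
def pvBuildA (g : Int) : Nat → List String → List Int → List String
  | _, [], _ => []
  | i, t :: rest, nums =>
    if i % 2 = 0 then t :: pvBuildA g (i + 1) rest nums
    else
      match nums with
      | n :: ns => PySem.Int.toStr (PySem.Int.floordiv n g) :: pvBuildA g (i + 1) rest ns
      | [] => []

def simplify_formula (s : String) : String :=
  let tokens := PySem.Str.split₀ s
  match pvLoopA 0 tokens with
  | none => s
  | some numbers =>
    if numbers.length < 2 then s
    else
      match numbers with
      | [] => s  -- unreachable: length ≥ 2
      | n :: rest =>
        let overallGcd := pvReduceGcd n rest
        if overallGcd = 1 then s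
        else PySem.Str.join " " (pvBuildA overallGcd 0 tokens numbers)

-- ===== PORT B =====
-- Source B's _parse_pairs: recursive two-at-a-time consumption into (element, count) pairs plus
-- an optional dangling trailing element; none = invalid shape
def pvParsePairs : List String → Option (List (String × Int) × Option String)
  | [] => some ([], none)
  | [a] => if (PySem.Int.ofStr? a).isSome then none else some ([], some a)
  | a :: b :: rest =>
    if (PySem.Int.ofStr? a).isSome then none
    else
      match PySem.Int.ofStr? b with
      | none => none
      | some c => (pvParsePairs rest).map (fun pt => ((a, c) :: pt.1, pt.2))

def simplify_formula_alt (s : String) : String :=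
  match pvParsePairs (PySem.Str.split₀ s) with
  | none => s
  | some (pairs, tail) =>
    if pairs.length < 2 then s
    else
      match pairs with
      | [] => s  -- unreachable: length ≥ 2
      | (_, c0) :: rest =>
        let g := pvReduceGcd c0 (rest.map Prod.snd)  -- reduce(gcd, counts), first count = c0
        if g = 1 then s
        else
          let words := pairs.flatMap
            (fun p => [p.1, PySem.Int.toStr (PySem.Int.floordiv p.2 g)])
          let words := match tail with
            | some t => words ++ [t]
            | none => words
          PySem.Str.join " " words

-- ===== PRECONDITION & SPEC =====
-- Pre_ excludes exactly the inputs where Python A raises ZeroDivisionError (and Python B does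
-- too): well-formed formulas of ≥ 2 counts whose counts are all 0, so that reduce(gcd, …) = 0.
def Pre_simplify_formula (s : String) : Prop :=
  ¬ (4 ≤ (PySem.Str.split₀ s).length ∧
     ∀ p ∈ (PySem.Str.split₀ s).zipIdx,
       (p.2 % 2 = 0 → PySem.Int.ofStr? p.1 = none) ∧
       (p.2 % 2 = 1 → PySem.Int.ofStr? p.1 = some 0))
instance (s : String) : Decidable (Pre_simplify_formula s) := by
  unfold Pre_simplify_formula; infer_instance

def pvWitness_simplify_formula : String := "H 2 O 4"

def Spec_simplify_formula (s : String) (out : String) : Prop := out = simplify_formula_alt s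
instance (s : String) (out : String) : Decidable (Spec_simplify_formula s out) := by
  unfold Spec_simplify_formula; infer_instance

-- ===== CLAIM (what is proved, stated in full; the proofs are below) =====
def Claim_equal_simplify_formula : Prop :=
  ∀ (s : String), Dom_simplify_formula s → Pre_simplify_formula s →
    Spec_simplify_formula s (simplify_formula s)

-- ===== LEMMAS AND PROOFS =====

-- two-tokens-at-a-time recursion skeleton (used only for its .induct principle)
def pvPairRec : List String → Unit
  | [] => ()
  | [_] => ()
  | _ :: _ :: rest => pvPairRec rest

-- A's first loop fails exactly when B's pair parse fails, and its numbers list is the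
-- second components of B's pair list
theorem pvLoopA_pairs (ts : List String) : ∀ i : Nat, i % 2 = 0 →
    pvLoopA i ts = (pvParsePairs ts).map (fun pt => pt.1.map Prod.snd) := by
  induction ts using pvPairRec.induct with
  | case1 =>
    intro i hi
    simp [pvLoopA, pvParsePairs]
  | case2 a =>
    intro i hi
    cases ha : PySem.Int.ofStr? a <;>
      simp [pvLoopA, pvParsePairs, hi, ha]
  | case3 a b rest ih =>
    intro i hi
    have h1 : ¬ (i + 1) % 2 = 0 := by omega
    have h2 : (i + 2) % 2 = 0 := by omega
    cases ha : PySem.Int.ofStr? a with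
    | some n => simp [pvLoopA, pvParsePairs, hi, ha]
    | none =>
      cases hb : PySem.Int.ofStr? b with
      | none => simp [pvLoopA, pvParsePairs, hi, h1, ha, hb]
      | some n =>
        have hrec := ih (i + 2) h2
        cases hp : pvParsePairs rest with
        | none => simp [pvLoopA, pvParsePairs, hi, h1, ha, hb, hp, hrec]
        | some pt => simp [pvLoopA, pvParsePairs, hi, h1, ha, hb, hp, hp ▸ hrec]

-- A's second loop, fed the counts of B's pair list, is B's flatMap rebuild plus the tail
theorem pvBuildA_pairs (g : Int) : ∀ (ts : List String) (pairs : List (String × Int))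
    (tail : Option String) (i : Nat), i % 2 = 0 →
    pvParsePairs ts = some (pairs, tail) →
    pvBuildA g i ts (pairs.map Prod.snd) =
      pairs.flatMap (fun p => [p.1, PySem.Int.toStr (PySem.Int.floordiv p.2 g)]) ++
        tail.toList := by
  intro ts
  induction ts using pvPairRec.induct with
  | case1 =>
    intro pairs tail i hi hp
    simp [pvParsePairs] at hp
    obtain ⟨h1, h2⟩ := hp
    subst h1; subst h2
    simp [pvBuildA]
  | case2 a =>
    intro pairs tail i hi hp
    by_cases ha : (PySem.Int.ofStr? a).isSome
    · simp [pvParsePairs, ha] at hp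
    · simp [pvParsePairs, ha] at hp
      obtain ⟨h1, h2⟩ := hp
      subst h1; subst h2
      simp [pvBuildA, hi]
  | case3 a b rest ih =>
    intro pairs tail i hi hp
    have h1 : ¬ (i + 1) % 2 = 0 := by omega
    have h2 : (i + 2) % 2 = 0 := by omega
    by_cases ha : (PySem.Int.ofStr? a).isSome
    · simp [pvParsePairs, ha] at hp
    · cases hb : PySem.Int.ofStr? b with
      | none => simp [pvParsePairs, ha, hb] at hp
      | some c =>
        cases hrest : pvParsePairs rest with
        | none => simp [pvParsePairs, ha, hb, hrest] at hp
        | some pt =>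
          simp [pvParsePairs, ha, hb, hrest] at hp
          obtain ⟨h3, h4⟩ := hp
          subst h3; subst h4
          have := ih pt.1 pt.2 (i + 2) h2 (by rw [hrest])
          simp [pvBuildA, hi, h1, this]

-- ===== VERDICT (by name: the statement is the Claim_ definition above) =====
theorem simplify_formula_spec : Claim_equal_simplify_formula := by
  intro s hdom hpre
  unfold Spec_simplify_formula
  simp only [simplify_formula, simplify_formula_alt]
  rw [pvLoopA_pairs (PySem.Str.split₀ s) 0 rfl]
  cases hp : pvParsePairs (PySem.Str.split₀ s) with
  | none => simp
  | some pt =>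
    obtain ⟨pairs, tail⟩ := pt
    by_cases hlen : pairs.length < 2
    · simp [hlen]
    · cases pairs with
      | nil => simp at hlen
      | cons p0 rest =>
        obtain ⟨e0, c0⟩ := p0
        by_cases hone : pvReduceGcd c0 (rest.map Prod.snd) = 1
        · simp [hone]
        · have hb := pvBuildA_pairs (pvReduceGcd c0 (rest.map Prod.snd))
            (PySem.Str.split₀ s) ((e0, c0) :: rest) tail 0 rfl hp
          simp only [List.map_cons] at hb
          simp [hone, hb]
          cases tail <;> simp
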